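-- pv_equiv track=rewrite | github.com/KalashKale/Daily-Challenge | Day 15 - Oscars/predictions.py | oscar_pool
-- ===== SOURCE A (Python) =====
-- def oscar_pool(predictions):
--
--     actual = [
--         "One Battle After Another",
--         "Michael B. Jordan",
--         "Jessie Buckley",
--         "Paul Thomas Anderson"
--     ]
--
--     max_correct = -1
--     winner = ""
--     tie = False
--
--     for friend in predictions:
--         name = friend[0]
--         correct = 0
--
--         for i in range(4):
--             if friend[i + 1] == actual[i]:
--                 correct += 1
--
--         if correct > max_correct:
--             max_correct = correct
--             winner = name
--             tie = False
--         elif correct == max_correct: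
--             tie = True
--
--     return "Tie" if tie else winner
-- ===== SOURCE B (Python) =====
-- def oscar_pool(predictions):
--     actual = [
--         "One Battle After Another",
--         "Michael B. Jordan",
--         "Jessie Buckley",
--         "Paul Thomas Anderson"
--     ]
--     scores = [sum(friend[i + 1] == actual[i] for i in range(4)) for friend in predictions]
--     if not scores:
--         return ""
--     best = max(scores)
--     if scores.count(best) > 1:
--         return "Tie"
--     return predictions[scores.index(best)][0]
-- ===== Notes on version B (the rewrite author's own statement) =====
-- stated objective: simpler
-- what changed: Replaces the single-pass running-max with a tie flag and winner state by a score table built first, then max/count/index scans to decide Tie vs the first best friend.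
import Mathlib
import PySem

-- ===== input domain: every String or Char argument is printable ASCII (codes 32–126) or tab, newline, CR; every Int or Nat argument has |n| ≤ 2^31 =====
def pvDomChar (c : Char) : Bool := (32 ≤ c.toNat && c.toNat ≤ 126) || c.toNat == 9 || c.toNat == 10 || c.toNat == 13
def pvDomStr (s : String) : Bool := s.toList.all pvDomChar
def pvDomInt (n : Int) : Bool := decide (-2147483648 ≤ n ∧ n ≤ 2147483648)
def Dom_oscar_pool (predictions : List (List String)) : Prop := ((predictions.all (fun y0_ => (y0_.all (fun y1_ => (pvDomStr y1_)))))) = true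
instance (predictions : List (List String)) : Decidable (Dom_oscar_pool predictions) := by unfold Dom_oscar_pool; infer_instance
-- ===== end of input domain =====

-- B replaces A's single-pass running-max/tie-flag state machine by a score table followed by
-- max / count / index scans (a simpler decomposition, same O(n) cost).

-- the hard-coded actual-winners list (written identically inside A and inside B)
def oscarActual : List String :=
  ["One Battle After Another", "Michael B. Jordan", "Jessie Buckley", "Paul Thomas Anderson"]

-- ===== PORT A =====
-- A's inner 'for i in range(4): if friend[i+1] == actual[i]: correct += 1' loop
-- (indexing via pyGet?/getD ""; Pre_ below excludes exactly the inputs where Python raises)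
def oscarScoreA (friend : List String) : Int :=
  (PySem.List.pyRange 0 4 1).foldl (fun c i =>
    if ((PySem.List.pyGet? friend (i + 1)).getD "") == ((PySem.List.pyGet? oscarActual i).getD "") then c + 1 else c) 0

def oscar_pool (predictions : List (List String)) : String :=
  -- loop state = (max_correct, winner, tie), seeded (-1, "", False)
  let st := predictions.foldl (fun (st : Int × String × Bool) friend =>
    let name := (PySem.List.pyGet? friend 0).getD ""
    let correct := oscarScoreA friend
    if correct > st.1 then (correct, name, false)
    else if correct == st.1 then (st.1, st.2.1, true)
    else st) (-1, "", false)
  if st.2.2 then "Tie" else st.2.1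

-- ===== PORT B =====
-- B's per-friend score: sum(friend[i + 1] == actual[i] for i in range(4)) — a sum of 0/1 terms
def oscarScoreB (friend : List String) : Int :=
  (PySem.List.pyRange 0 4 1).foldl (fun c i =>
    c + (if ((PySem.List.pyGet? friend (i + 1)).getD "") == ((PySem.List.pyGet? oscarActual i).getD "") then 1 else 0)) 0

def oscar_pool_alt (predictions : List (List String)) : String :=
  let scores := predictions.map oscarScoreB
  if scores.isEmpty then ""
  else
    let best := (PySem.List.max? scores (fun x => x)).getD 0   -- max(scores) on a nonempty list
    if PySem.List.count scores best > 1 then "Tie"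
    else
      match PySem.List.index? scores best with
      | none => ""
      | some i => ((PySem.List.pyGet? predictions (i : Int)).bind (fun f => PySem.List.pyGet? f 0)).getD ""

-- ===== PRECONDITION & SPEC =====
-- Pre_ excludes exactly the inputs on which A raises IndexError: some friend list with fewer than 5 entries
def Pre_oscar_pool (predictions : List (List String)) : Prop :=
  ∀ f ∈ predictions, 5 ≤ f.length
instance (predictions : List (List String)) : Decidable (Pre_oscar_pool predictions) := by unfold Pre_oscar_pool; infer_instance

def pvWitness_oscar_pool : List (List String) :=
  [["amy", "One Battle After Another", "x", "Jessie Buckley", "y"],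
   ["bob", "One Battle After Another", "Michael B. Jordan", "z", "w"]]

def Spec_oscar_pool (predictions : List (List String)) (out : String) : Prop := out = oscar_pool_alt predictions
instance (predictions : List (List String)) (out : String) : Decidable (Spec_oscar_pool predictions out) := by unfold Spec_oscar_pool; infer_instance

-- ===== CLAIM (what is proved, stated in full; the proofs are below) =====
def Claim_equal_oscar_pool : Prop := ∀ (predictions : List (List String)), Dom_oscar_pool predictions → Pre_oscar_pool predictions → Spec_oscar_pool predictions (oscar_pool predictions)

-- ===== LEMMAS AND PROOFS =====

-- A's count-up loop and B's 0/1 sum are the same count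
lemma oscar_score_eq (f : List String) : oscarScoreA f = oscarScoreB f := by
  unfold oscarScoreA oscarScoreB
  rw [PySem.List.foldl_if_add_one, PySem.List.foldl_add, PySem.List.sum_map_ite_one_zero]

-- the name both ports read off a friend
def oscarName (friend : List String) : String := (PySem.List.pyGet? friend 0).getD ""

def oscarPair (friend : List String) : String × Int := (oscarName friend, oscarScoreB friend)

-- A's loop body on an already-scored (name, score) pair
def oscarStepP (st : Int × String × Bool) (p : String × Int) : Int × String × Bool :=
  if p.2 > st.1 then (p.2, p.1, false)
  else if p.2 == st.1 then (st.1, st.2.1, true)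
  else st

-- what the state machine computes, phrased in B's max / count / first-hit terms
def oscarTable (l : List (String × Int)) (M : Int) (W : String) (T : Bool) : String :=
  let best := l.foldl (fun m p => max m p.2) M
  if best = M ∧ 0 < l.countP (fun p => p.2 == best) then "Tie"
  else if best = M then (if T then "Tie" else W)
  else if 1 < l.countP (fun p => p.2 == best) then "Tie"
  else ((l.find? (fun p => p.2 == best)).map Prod.fst).getD W

lemma oscar_find_isSome {l : List (String × Int)} {best : Int} (M : Int)
    (hmem : l.foldl (fun m p => max m p.2) M ∈ l.map Prod.snd)
    (hb : best = l.foldl (fun m p => max m p.2) M) :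
    (l.find? (fun p => p.2 == best)).isSome := by
  rw [List.find?_isSome]
  rcases List.mem_map.mp hmem with ⟨p, hp, hps⟩
  exact ⟨p, hp, by simp [hb, hps]⟩

-- the heart of the proof: A's running-max/tie-flag loop from any state is the table scan
lemma oscar_run_eq_table (l : List (String × Int)) :
    ∀ (M : Int) (W : String) (T : Bool),
      (let st := l.foldl oscarStepP (M, W, T); if st.2.2 then "Tie" else st.2.1) = oscarTable l M W T := by
  induction l with
  | nil => intro M W T; simp [oscarTable]
  | cons p l ih =>
    intro M W T
    obtain ⟨nm, s⟩ := p
    have hfm := PySem.List.le_foldl_max_int l Prod.snd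
    have hmm : ∀ a : Int, l.foldl (fun m p => max m p.2) a = a ∨
        l.foldl (fun m p => max m p.2) a ∈ l.map Prod.snd := by
      intro a
      have := PySem.List.foldl_max_mem (l.map Prod.snd) a
      simpa [List.foldl_map] using this
    rcases lt_trichotomy M s with hMs | hMs | hMs
    · -- s > M : the state resets to (s, nm, false)
      have hstep : oscarStepP (M, W, T) (nm, s) = (s, nm, false) := by
        simp [oscarStepP, hMs]
      simp only [List.foldl_cons, hstep, ih]
      simp only [oscarTable, List.foldl_cons, List.countP_cons, List.find?_cons]
      have hmax : max M s = s := by omega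
      rw [hmax]
      have hsle := (hfm s).1
      by_cases hsb : l.foldl (fun m p => max m p.2) s = s
      · simp only [hsb]
        have hMne : ¬ (s = M) := by omega
        simp [beq_iff_eq, hMne]
        rw [show ((s : Int) == s) = true from by simp, if_pos rfl]
        split_ifs with h1 h2 <;> simp_all
      · have hMne : ¬ (l.foldl (fun m p => max m p.2) s = M) := by omega
        have hne : ¬ ((s : Int) == l.foldl (fun m p => max m p.2) s) = true := by
          simp [beq_iff_eq]; omega
        have hmem : l.foldl (fun m p => max m p.2) s ∈ l.map Prod.snd :=
          (hmm s).resolve_left hsb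
        have hfs := oscar_find_isSome s hmem rfl
        obtain ⟨q, hq⟩ := Option.isSome_iff_exists.mp hfs
        simp [hMne, hsb, hne, hq]
    · -- s = M : only the tie flag is set
      subst hMs
      have hstep : oscarStepP (M, W, T) (nm, M) = (M, W, true) := by
        simp [oscarStepP]
      simp only [List.foldl_cons, hstep, ih]
      simp only [oscarTable, List.foldl_cons, List.countP_cons, List.find?_cons, max_self]
      by_cases hsb : l.foldl (fun m p => max m p.2) M = M
      · simp [hsb, beq_iff_eq]
      · have hne : ¬ ((M : Int) == l.foldl (fun m p => max m p.2) M) = true := by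
          simp [beq_iff_eq]; exact fun h => hsb h.symm
        simp [hsb, hne]
    · -- s < M : nothing changes
      have hstep : oscarStepP (M, W, T) (nm, s) = (M, W, T) := by
        have h1 : ¬ (s > M) := by omega
        have h2 : ¬ ((s : Int) == M) = true := by simp [beq_iff_eq]; omega
        simp [oscarStepP, h1, h2]
      simp only [List.foldl_cons, hstep, ih]
      simp only [oscarTable, List.foldl_cons, List.countP_cons, List.find?_cons]
      have hmax : max M s = M := by omega
      rw [hmax]
      have hsle := (hfm M).1
      have hne : ¬ ((s : Int) == l.foldl (fun m p => max m p.2) M) = true := by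
        simp only [beq_iff_eq]; omega
      have hne2 : ((s : Int) == l.foldl (fun m p => max m p.2) M) = false := by
        simp only [beq_eq_false_iff_ne, ne_eq]; omega
      rw [if_neg hne, Nat.add_zero, hne2]

-- B's index?/pyGet? finale is the first (name, score) pair hitting the best score
lemma oscar_index_find (preds : List (List String)) (best : Int) :
    (match PySem.List.index? (preds.map oscarScoreB) best with
     | none => ""
     | some i => ((PySem.List.pyGet? preds (i : Int)).bind (fun f => PySem.List.pyGet? f 0)).getD "")
    = (((preds.map oscarPair).find? (fun p => p.2 == best)).map Prod.fst).getD "" := by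
  induction preds with
  | nil => simp [PySem.List.index?]
  | cons f t ih =>
    by_cases h : oscarScoreB f = best
    · subst h
      rw [List.map_cons, PySem.List.index?_cons_self]
      simp [oscarPair, oscarName]
    · rw [List.map_cons, PySem.List.index?_cons_of_ne _ h]
      rw [List.map_cons, List.find?_cons]
      have hb : ((oscarPair f).2 == best) = false := by
        simp [oscarPair, h]
      rw [hb]
      rcases hi : PySem.List.index? (t.map oscarScoreB) best with _ | i
      · rw [hi] at ih
        exact ih
      · rw [hi] at ih
        simp only [Option.map_some]
        rw [show (((i + 1 : Nat)) : Int) = ((i : Int) + 1) from by push_cast; ring,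
            PySem.List.pyGet?_cons_succ]
        exact ih

-- each score is a count, hence nonnegative
lemma oscar_score_nonneg (f : List String) : 0 ≤ oscarScoreB f := by
  unfold oscarScoreB
  rw [PySem.List.foldl_add, PySem.List.sum_map_ite_one_zero]
  positivity

theorem oscar_pool_spec : Claim_equal_oscar_pool := by
  unfold Claim_equal_oscar_pool
  intro preds _ _hpre
  unfold Spec_oscar_pool
  -- A's side: the loop over friends is the pair-state machine, hence the table scan
  have hA : oscar_pool preds = oscarTable (preds.map oscarPair) (-1) "" false := by
    rw [← oscar_run_eq_table]
    unfold oscar_pool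
    rw [List.foldl_map]
    have := PySem.List.foldl_congr_mem'
      (l := preds) (init := ((-1 : Int), "", false))
      (f := fun (st : Int × String × Bool) friend =>
        let name := (PySem.List.pyGet? friend 0).getD ""
        let correct := oscarScoreA friend
        if correct > st.1 then (correct, name, false)
        else if correct == st.1 then (st.1, st.2.1, true)
        else st)
      (g := fun st x => oscarStepP st (oscarPair x))
      (fun x hx st => by
        simp only [oscarStepP, oscarPair, oscarName, ← oscar_score_eq x])
    rw [this]
  rw [hA]
  -- B's side, by cases on emptiness
  cases preds with
  | nil => simp [oscar_pool_alt, oscarTable]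
  | cons f t =>
    have hnn := oscar_score_nonneg f
    have hble := (PySem.List.le_foldl_max (t.map oscarScoreB) (oscarScoreB f)).1
    set best := (t.map oscarScoreB).foldl max (oscarScoreB f) with hbest
    have hm0 : max (-1 : Int) (oscarScoreB f) = oscarScoreB f := by omega
    have hbne : ¬ (best = -1) := by omega
    have htblmax' : (t.map oscarPair).foldl (fun m p => max m p.2) (max (-1) (oscarPair f).2) = best := by
      rw [hbest, List.foldl_map, List.foldl_map]
      simp only [oscarPair, hm0]
    have hcnt : (oscarPair f :: t.map oscarPair).countP (fun p => p.2 == best)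
        = PySem.List.count (oscarScoreB f :: t.map oscarScoreB) best := by
      simp only [PySem.List.count, List.count_eq_countP, List.countP_cons, List.countP_map]
      rfl
    have hif := oscar_index_find (f :: t) best
    simp only [List.map_cons] at hif
    simp only [oscar_pool_alt, oscarTable, List.map_cons, List.isEmpty_cons,
      Bool.false_eq_true, if_false, PySem.List.max?_id_cons, Option.getD_some,
      List.foldl_cons]
    rw [← hbest, htblmax']
    simp only [hbne, false_and, if_false]
    simp only [hcnt, gt_iff_lt]
    by_cases h1 : 1 < PySem.List.count (oscarScoreB f :: t.map oscarScoreB) best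
    · rw [if_pos h1, if_pos h1]
    · rw [if_neg h1, if_neg h1]
      exact hif.symm
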